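-- pv_equiv track=rewrite | github.com/varuncris07/NSE-52W-SCREENER | utils.py | get_yahoo_tickers
-- ===== SOURCE A (Python) =====
-- from collections.abc import Iterable, Mapping
-- from typing import Sequence
--
-- def get_yahoo_tickers(symbols: Mapping[str, Sequence[str]] | Iterable[str]) -> list[str]:
--     """Return a sorted list of deduplicated Yahoo-compatible tickers.
--
--     ``symbols`` may be the mapping produced by :func:`load_symbols` or any
--     iterable of raw symbol strings.  The helper normalises each element so it is
--     ready for :mod:`yfinance` downloads.
--     """
--
--     if isinstance(symbols, Mapping):
--         iterables: Iterable[str] = (sym for bucket in symbols.values() for sym in bucket)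
--     else:
--         iterables = symbols
--
--     if isinstance(iterables, str):
--         iterables = [iterables]
--
--     seen: set[str] = set()
--     ordered: list[str] = []
--     for raw in iterables:
--         if not raw:
--             continue
--         sym = str(raw).strip().upper()
--         if not sym:
--             continue
--
--         if sym.startswith("^"):
--             normalised = sym
--         elif sym.endswith(".NS"):
--             normalised = sym
--         else:
--             normalised = f"{sym}.NS"
--
--         if normalised not in seen:
--             seen.add(normalised)
--             ordered.append(normalised)
--
--     ordered.sort()
--     return ordered
-- ===== SOURCE B (Python) =====
-- from collections.abc import Iterable, Mapping
-- from typing import Sequence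
--
-- def get_yahoo_tickers(symbols):
--     """Sort-then-adjacent-unique: normalize into a plain list (no set, no
--     membership test), sort it, then deduplicate in one pass over adjacent
--     elements."""
--     if isinstance(symbols, Mapping):
--         items = [sym for bucket in symbols.values() for sym in bucket]
--     elif isinstance(symbols, str):
--         items = [symbols]
--     else:
--         items = list(symbols)
--
--     norms = []
--     for raw in items:
--         if not raw:
--             continue
--         sym = str(raw).strip().upper()
--         if not sym:
--             continue
--         if sym.startswith("^") or sym.endswith(".NS"):
--             norms.append(sym)
--         else:
--             norms.append(sym + ".NS")
--
--     norms.sort()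
--
--     out = []
--     prev = None
--     for x in norms:
--         if x != prev:
--             out.append(x)
--             prev = x
--     return out
-- ===== Notes on version B (the rewrite author's own statement) =====
-- stated objective: alternative
-- what changed: B drops the hash-set/first-occurrence dedup: it collects all normalized symbols into a plain list, sorts it, and deduplicates in a single adjacent-comparison pass over the sorted list.
import Mathlib
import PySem

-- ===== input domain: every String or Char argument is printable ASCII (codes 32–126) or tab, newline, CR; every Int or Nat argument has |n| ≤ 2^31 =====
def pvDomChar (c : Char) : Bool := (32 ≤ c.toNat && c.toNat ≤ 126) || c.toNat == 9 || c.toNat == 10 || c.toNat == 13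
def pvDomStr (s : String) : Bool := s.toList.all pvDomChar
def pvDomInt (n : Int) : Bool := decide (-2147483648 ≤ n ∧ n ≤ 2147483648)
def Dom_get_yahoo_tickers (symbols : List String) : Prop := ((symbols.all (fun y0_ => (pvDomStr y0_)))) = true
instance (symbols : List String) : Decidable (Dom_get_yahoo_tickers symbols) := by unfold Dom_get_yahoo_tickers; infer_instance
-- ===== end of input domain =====

-- B replaces A's hash-set first-occurrence dedup by the standard sort-then-adjacent-unique idiom
-- (same O(n log n) cost, a different dedup data structure/traversal); return values proved equal.


-- ===== PORT A =====
-- loop body of A's for-loop: state = (seen, ordered)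
def pvStepA (st : PySem.Set String × List String) (raw : String) : PySem.Set String × List String :=
  if raw = "" then st
  else
    let sym := PySem.Str.upper (PySem.Str.strip raw)
    if sym = "" then st
    else
      let normalised :=
        if PySem.Str.startswith sym "^" then sym
        else if PySem.Str.endswith sym ".NS" then sym
        else sym ++ ".NS"
      if PySem.Set.contains st.1 normalised then st
      else (PySem.Set.add st.1 normalised, st.2 ++ [normalised])

def get_yahoo_tickers (symbols : List String) : List String :=
  let st := symbols.foldl pvStepA (PySem.Set.empty, [])
  PySem.List.sorted st.2 (fun x => x) false

-- ===== PORT B =====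
-- loop body of B's normalization loop (appends to a plain list, no set)
def pvStepNorm (acc : List String) (raw : String) : List String :=
  if raw = "" then acc
  else
    let sym := PySem.Str.upper (PySem.Str.strip raw)
    if sym = "" then acc
    else if PySem.Str.startswith sym "^" || PySem.Str.endswith sym ".NS" then acc ++ [sym]
    else acc ++ [sym ++ ".NS"]

-- loop body of B's adjacent-dedup loop: state = (out, prev)
def pvStepU (st : List String × Option String) (x : String) : List String × Option String :=
  if some x ≠ st.2 then (st.1 ++ [x], some x) else st

def get_yahoo_tickers_alt (symbols : List String) : List String :=
  let norms := symbols.foldl pvStepNorm []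
  let sortedNorms := PySem.List.sorted norms (fun x => x) false
  (sortedNorms.foldl pvStepU ([], none)).1

-- ===== PRECONDITION & SPEC =====
def Spec_get_yahoo_tickers (symbols : List String) (out : List String) : Prop := out = get_yahoo_tickers_alt symbols
instance (symbols : List String) (out : List String) : Decidable (Spec_get_yahoo_tickers symbols out) := by unfold Spec_get_yahoo_tickers; infer_instance

-- ===== CLAIM (what is proved, stated in full; the proofs are below) =====
def Claim_equal_get_yahoo_tickers : Prop := ∀ (symbols : List String), Dom_get_yahoo_tickers symbols → Spec_get_yahoo_tickers symbols (get_yahoo_tickers symbols)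

-- ===== LEMMAS AND PROOFS =====

-- the normalization both loops perform, as an Option-valued function
def pvNorm (raw : String) : Option String :=
  if raw = "" then none
  else
    let sym := PySem.Str.upper (PySem.Str.strip raw)
    if sym = "" then none
    else some (if PySem.Str.startswith sym "^" then sym
               else if PySem.Str.endswith sym ".NS" then sym
               else sym ++ ".NS")

-- the value of B's adjacent-dedup loop, as structural recursion
def pvUniq (p : Option String) : List String → List String
  | [] => []
  | x :: xs => if some x = p then pvUniq p xs else x :: pvUniq (some x) xs

lemma pvStepA_eq (o : List String) (raw : String) :
    pvStepA (o, o) raw =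
      ((pvNorm raw).elim (o, o) (fun n => (PySem.Set.add o n, PySem.Set.add o n))) := by
  unfold pvStepA pvNorm PySem.Set.add
  split_ifs <;> simp_all; split_ifs <;> simp_all

lemma pvFoldA (xs : List String) (o : List String) :
    List.foldl pvStepA (o, o) xs =
      ((xs.filterMap pvNorm).foldl PySem.Set.add o,
       (xs.filterMap pvNorm).foldl PySem.Set.add o) := by
  induction xs generalizing o with
  | nil => simp
  | cons x xs ih =>
    rw [List.foldl_cons, pvStepA_eq, List.filterMap_cons]
    cases hn : pvNorm x with
    | none => simpa using ih o
    | some n => simpa using ih (PySem.Set.add o n)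

lemma pvStepNorm_eq (acc : List String) (raw : String) :
    pvStepNorm acc raw = ((pvNorm raw).elim acc (fun n => acc ++ [n])) := by
  unfold pvStepNorm pvNorm
  split_ifs <;> simp_all; split_ifs <;> simp_all

lemma pvFoldNorm (xs : List String) (acc : List String) :
    List.foldl pvStepNorm acc xs = acc ++ xs.filterMap pvNorm := by
  induction xs generalizing acc with
  | nil => simp
  | cons x xs ih =>
    rw [List.foldl_cons, pvStepNorm_eq, List.filterMap_cons]
    cases hn : pvNorm x with
    | none => simpa using ih acc
    | some n => simpa using ih (acc ++ [n])

lemma pvFoldU (xs : List String) (st : List String × Option String) :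
    (List.foldl pvStepU st xs).1 = st.1 ++ pvUniq st.2 xs := by
  induction xs generalizing st with
  | nil => simp [pvUniq]
  | cons x xs ih =>
    simp only [List.foldl_cons, pvStepU, pvUniq]
    by_cases h : some x = st.2
    · simp [h, ih]
    · simp [h, ih]

lemma pvUniq_spec (l : List String) (p : Option String)
    (hsort : l.Pairwise (· ≤ ·)) (hp : ∀ m, p = some m → ∀ a ∈ l, m ≤ a) :
    (pvUniq p l).Pairwise (· < ·) ∧ (∀ a, a ∈ pvUniq p l ↔ a ∈ l ∧ some a ≠ p) := by
  induction l generalizing p with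
  | nil => simp [pvUniq]
  | cons x xs ih =>
    have hx : ∀ a ∈ xs, x ≤ a := (List.pairwise_cons.mp hsort).1
    have hxs : xs.Pairwise (· ≤ ·) := (List.pairwise_cons.mp hsort).2
    have ihx := ih (some x) hxs (by rintro m hm a ha; cases hm; exact hx a ha)
    by_cases h : some x = p
    · subst h
      refine ⟨by simpa [pvUniq] using ihx.1, ?_⟩
      intro a
      rw [show pvUniq (some x) (x :: xs) = pvUniq (some x) xs by simp [pvUniq], ihx.2 a,
          List.mem_cons]
      constructor
      · rintro ⟨ha, hne⟩; exact ⟨Or.inr ha, hne⟩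
      · rintro ⟨rfl | ha, hne⟩
        · exact absurd rfl hne
        · exact ⟨ha, hne⟩
    · constructor
      · simp only [pvUniq, if_neg h]
        refine List.pairwise_cons.mpr ⟨?_, ihx.1⟩
        intro a ha
        have hm := (ihx.2 a).mp ha
        exact lt_of_le_of_ne (hx a hm.1) (fun he => hm.2 (by simp [he]))
      · intro a
        simp only [pvUniq, if_neg h, List.mem_cons, ihx.2 a]
        constructor
        · rintro (rfl | ⟨ha, hne⟩)
          · exact ⟨Or.inl rfl, h⟩
          · refine ⟨Or.inr ha, fun hc => ?_⟩
            have h1 : a ≤ x := hp a hc.symm x (List.mem_cons_self)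
            have h2 : x ≤ a := hx a ha
            exact hne (by rw [le_antisymm h1 h2])
        · rintro ⟨rfl | ha, hne⟩
          · exact Or.inl rfl
          · by_cases hax : a = x
            · exact Or.inl hax
            · exact Or.inr ⟨ha, by simpa using hax⟩

-- ===== VERDICT (by name: the statement is the Claim_ definition above) =====
theorem get_yahoo_tickers_spec : Claim_equal_get_yahoo_tickers := by
  intro symbols _
  show get_yahoo_tickers symbols = get_yahoo_tickers_alt symbols
  unfold get_yahoo_tickers get_yahoo_tickers_alt
  have hA := pvFoldA symbols []
  rw [show (PySem.Set.empty, ([] : List String)) = (([] : List String), ([] : List String)) from rfl,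
      hA, pvFoldNorm, pvFoldU]
  simp only [List.nil_append]
  rw [← PySem.Set.ofList_eq_foldl]
  set norms := symbols.filterMap pvNorm with hn
  have hsp : (PySem.List.sorted norms (fun x => x) false).Pairwise (· ≤ ·) := by
    simpa using PySem.List.sorted_pairwise norms (fun x => x)
  have huniq := pvUniq_spec (PySem.List.sorted norms (fun x => x) false) none hsp (by simp)
  apply PySem.List.sorted_eq_of_perm_of_pairwise_lt
  · rw [List.perm_ext_iff_of_nodup (List.Pairwise.imp ne_of_lt huniq.1) (PySem.Set.nodup_ofList norms)]
    intro a
    rw [huniq.2 a, PySem.Set.mem_ofList, PySem.List.mem_sorted]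
    simp
  · exact huniq.1
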